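-- pv_equiv track=rewrite | github.com/moratb/tools | hard_counter.py | cumsum_is_paid
-- ===== SOURCE A (Python) =====
-- def cumsum_is_paid(x, mode):
--     """Функция помечает строки. 1 - платная, 0 - бесплатная"""
--     cur = 0
--     res = []
--     hard_acum = []
--     for v in x:
--         if cur == 0:
--             is_paid = 0
--         else:
--             is_paid = 1
--         cur += v
--
--         if cur < 0:
--             cur = 0
--
--         hard_acum.append(cur)
--         res += [is_paid]
--
--     if mode == 'mark':
--         return res
--     elif mode == 'value':
--         return hard_acum
-- ===== SOURCE B (Python) =====
-- def cumsum_is_paid(x, mode):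
--     """Функция помечает строки. 1 - платная, 0 - бесплатная"""
--     # one pass builds the clamped cumulative sums; the marks are derived from it:
--     # row i is paid iff the clamped accumulator after row i-1 is positive.
--     hard_acum = []
--     cur = 0
--     for v in x:
--         cur += v
--         if cur < 0:
--             cur = 0
--         hard_acum.append(cur)
--     if mode == 'mark':
--         if not x:
--             return []
--         return [0] + [1 if h > 0 else 0 for h in hard_acum[:-1]]
--     elif mode == 'value':
--         return hard_acum
-- ===== Notes on version B (the rewrite author's own statement) =====
-- stated objective: simpler
-- what changed: B tracks only the clamped accumulator (no is_paid state) and derives the mark list afterwards from the accumulator list: mark i = [prev accumulator > 0], i.e. [0] + [1 if h>0 else 0 for h in hard_acum[:-1]].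
-- outside the precondition, e.g. on cumsum_is_paid([1, 2], 'other'): A returns None, B returns None
import Mathlib
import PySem

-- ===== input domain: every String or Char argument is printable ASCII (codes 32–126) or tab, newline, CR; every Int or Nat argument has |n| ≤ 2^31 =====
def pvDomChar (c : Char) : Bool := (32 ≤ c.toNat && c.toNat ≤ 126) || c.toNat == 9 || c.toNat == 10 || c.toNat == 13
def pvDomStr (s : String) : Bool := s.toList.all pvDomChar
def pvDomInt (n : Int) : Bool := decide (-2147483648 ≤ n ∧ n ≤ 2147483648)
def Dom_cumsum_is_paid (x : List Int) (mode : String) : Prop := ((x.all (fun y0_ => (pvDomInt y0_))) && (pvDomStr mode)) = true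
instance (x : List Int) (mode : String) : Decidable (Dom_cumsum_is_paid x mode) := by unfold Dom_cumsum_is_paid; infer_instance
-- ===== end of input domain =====

-- B derives the mark list from the clamped accumulator list instead of tracking an
-- is_paid state in the loop ('simpler'); equivalence about the RETURN value only.

-- ===== PORT A =====
-- one loop keeping (cur, res, hard_acum); branch order as in A
def cumsum_is_paid (x : List Int) (mode : String) : List Int :=
  let st := x.foldl (fun (s : Int × List Int × List Int) v =>
      let is_paid : Int := if s.1 == 0 then 0 else 1
      let cur := s.1 + v
      let cur := if cur < 0 then 0 else cur
      (cur, s.2.1 ++ [is_paid], s.2.2 ++ [cur])) (0, [], [])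
  if mode == "mark" then st.2.1
  else if mode == "value" then st.2.2
  else []  -- Python falls through and returns None here; excluded by Pre_

-- ===== PORT B =====
-- one loop building only hard_acum; marks derived as [0] + [1 if h>0 else 0 for h in hard_acum[:-1]]
def cumsum_is_paid_alt (x : List Int) (mode : String) : List Int :=
  let hard := (x.foldl (fun (s : Int × List Int) v =>
      let cur := s.1 + v
      let cur := if cur < 0 then 0 else cur
      (cur, s.2 ++ [cur])) ((0 : Int), ([] : List Int))).2
  if mode == "mark" then
    if x.isEmpty then []
    else 0 :: (PySem.List.slice hard none (some (-1))).map (fun h => if h > 0 then (1 : Int) else 0)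
  else if mode == "value" then hard
  else []  -- Python falls through and returns None here; excluded by Pre_

-- ===== PRECONDITION & SPEC =====
-- Pre_ excludes modes other than 'mark'/'value', on which Python A returns None (not a list).
def Pre_cumsum_is_paid (x : List Int) (mode : String) : Prop := mode = "mark" ∨ mode = "value"
instance (x : List Int) (mode : String) : Decidable (Pre_cumsum_is_paid x mode) := by unfold Pre_cumsum_is_paid; infer_instance
def pvWitness_cumsum_is_paid : List Int × String := ([1, -2, 3], "mark")

def Spec_cumsum_is_paid (x : List Int) (mode : String) (out : List Int) : Prop := out = cumsum_is_paid_alt x mode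
instance (x : List Int) (mode : String) (out : List Int) : Decidable (Spec_cumsum_is_paid x mode out) := by unfold Spec_cumsum_is_paid; infer_instance

-- ===== CLAIM (what is proved, stated in full; the proofs are below) =====
def Claim_equal_cumsum_is_paid : Prop := ∀ (x : List Int) (mode : String), Dom_cumsum_is_paid x mode → Pre_cumsum_is_paid x mode → Spec_cumsum_is_paid x mode (cumsum_is_paid x mode)

-- ===== LEMMAS AND PROOFS =====

-- reference clamped-accumulator and mark sequences, used to characterise both folds
def acumF : Int → List Int → List Int
  | _, [] => []
  | cur, v :: t => (if cur + v < 0 then 0 else cur + v) :: acumF (if cur + v < 0 then 0 else cur + v) t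

def marksF : Int → List Int → List Int
  | _, [] => []
  | cur, v :: t => (if cur == 0 then (0 : Int) else 1) :: marksF (if cur + v < 0 then 0 else cur + v) t

lemma foldA_eq (x : List Int) : ∀ (cur : Int) (res hard : List Int),
    (x.foldl (fun (s : Int × List Int × List Int) v =>
      let is_paid : Int := if s.1 == 0 then 0 else 1
      let cur := s.1 + v
      let cur := if cur < 0 then 0 else cur
      (cur, s.2.1 ++ [is_paid], s.2.2 ++ [cur])) (cur, res, hard)).2
    = (res ++ marksF cur x, hard ++ acumF cur x) := by
  induction x with
  | nil => intro cur res hard; simp [marksF, acumF]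
  | cons v t ih =>
      intro cur res hard
      simp only [List.foldl_cons, marksF, acumF, ih]
      simp

lemma foldB_eq (x : List Int) : ∀ (cur : Int) (acc : List Int),
    (x.foldl (fun (s : Int × List Int) v =>
      let cur := s.1 + v
      let cur := if cur < 0 then 0 else cur
      (cur, s.2 ++ [cur])) (cur, acc)).2 = acc ++ acumF cur x := by
  induction x with
  | nil => intro cur acc; simp [acumF]
  | cons v t ih =>
      intro cur acc
      simp only [List.foldl_cons, acumF, ih]
      simp

lemma acumF_ne_nil (cur v : Int) (t : List Int) : acumF cur (v :: t) ≠ [] := by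
  simp [acumF]

lemma marks_from_acum (t : List Int) : ∀ (v cur : Int), 0 ≤ cur →
    marksF cur (v :: t)
      = (if cur > 0 then (1 : Int) else 0)
        :: ((acumF cur (v :: t)).dropLast).map (fun h => if h > 0 then (1 : Int) else 0) := by
  induction t with
  | nil =>
      intro v cur h
      simp only [marksF, acumF, beq_iff_eq]
      rw [show ([if cur + v < 0 then (0 : Int) else cur + v].dropLast) = [] from rfl]
      simp only [List.map_nil]
      congr 1
      split_ifs <;> omega
  | cons w t' ih =>
      intro v cur h
      have hc : 0 ≤ (if cur + v < 0 then (0 : Int) else cur + v) := by split_ifs <;> omega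
      rw [show marksF cur (v :: w :: t')
            = (if cur == 0 then (0 : Int) else 1)
              :: marksF (if cur + v < 0 then 0 else cur + v) (w :: t') from rfl]
      rw [ih w (if cur + v < 0 then 0 else cur + v) hc]
      rw [show acumF cur (v :: w :: t')
            = (if cur + v < 0 then 0 else cur + v)
              :: acumF (if cur + v < 0 then 0 else cur + v) (w :: t') from rfl]
      rw [List.dropLast_cons_of_ne_nil (acumF_ne_nil _ w t'), List.map_cons]
      congr 1
      simp only [beq_iff_eq]
      split_ifs <;> omega

-- ===== VERDICT (by name: the statement is the Claim_ definition above) =====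
theorem cumsum_is_paid_spec : Claim_equal_cumsum_is_paid := by
  intro x mode _ hpre
  unfold Spec_cumsum_is_paid cumsum_is_paid cumsum_is_paid_alt
  simp only [foldA_eq, foldB_eq, List.nil_append]
  rcases hpre with h | h <;> subst h <;> simp only [beq_self_eq_true, if_true]
  · cases x with
    | nil => simp [marksF]
    | cons v t =>
        simp only [List.isEmpty_cons, Bool.false_eq_true, if_false]
        rw [PySem.List.slice_to_neg_one]
        rw [marks_from_acum t v 0 le_rfl]
        norm_num
  · rfl
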